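-- pv_equiv track=rewrite | github.com/MForofontov/Python-functions | iterable_functions/check_if_all_sets_are_same.py | check_if_all_sets_are_same
-- ===== SOURCE A (Python) =====
-- from typing import List, Set, Any
--
-- def check_if_all_sets_are_same(sets_list: List[Set[Any]]) -> bool:
--     """
--     Checks if all sets within a list are identical.
--
--     Parameters
--     ----------
--     sets_list : list
--         A list of sets to be checked for identity.
--
--     Returns
--     -------
--     bool
--         True if all sets in the list are identical, False otherwise.
--
--     Raises
--     ------
--     TypeError
--         If sets_list is not a list of sets.
--     """
--     if not isinstance(sets_list, list) or not all(isinstance(s, set) for s in sets_list):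
--         raise TypeError("sets_list must be a list of sets")
--
--     if len(sets_list) <= 1:
--         return True
--
--     reference_set = sets_list[0]
--
--     for s in sets_list[1:]:
--         if s != reference_set:
--             return False
--
--     return True
-- ===== SOURCE B (Python) =====
-- def check_if_all_sets_are_same(sets_list):
--     if not isinstance(sets_list, list) or not all(isinstance(s, set) for s in sets_list):
--         raise TypeError("sets_list must be a list of sets")
--     return len({frozenset(s) for s in sets_list}) <= 1
-- ===== Notes on version B (the rewrite author's own statement) =====
-- stated objective: idiomatic
-- what changed: B canonicalizes each set to a frozenset and builds the set of distinct sets, returning whether its size is at most 1, instead of A's early-exit loop comparing each set against the first.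
import Mathlib
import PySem

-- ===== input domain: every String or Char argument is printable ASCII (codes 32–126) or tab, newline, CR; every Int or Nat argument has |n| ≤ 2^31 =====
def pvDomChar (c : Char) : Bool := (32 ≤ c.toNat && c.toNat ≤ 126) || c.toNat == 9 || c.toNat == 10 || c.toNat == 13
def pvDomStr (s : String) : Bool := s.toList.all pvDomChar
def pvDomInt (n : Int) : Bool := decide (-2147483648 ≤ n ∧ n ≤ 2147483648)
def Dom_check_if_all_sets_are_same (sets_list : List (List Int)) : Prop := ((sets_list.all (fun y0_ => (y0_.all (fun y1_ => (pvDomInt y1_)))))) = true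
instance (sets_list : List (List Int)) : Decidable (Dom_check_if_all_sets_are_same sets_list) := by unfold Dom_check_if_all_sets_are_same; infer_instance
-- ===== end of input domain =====

-- B checks all sets identical by building the collection of distinct sets and testing its size ≤ 1,
-- instead of A's early-exit loop against the first set; idiomatic, same cost. Each inner list models a
-- Python set (distinct elements); equality of sets is PySem.Set.equal.

-- ===== PORT A =====
-- for s in sets_list[1:]: if s != reference_set: return False
def pvALoop (ref : List Int) : List (List Int) → Bool
  | [] => true
  | s :: rest => if (PySem.Set.equal s ref) = false then false else pvALoop ref rest

def check_if_all_sets_are_same (sets_list : List (List Int)) : Bool :=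
  if sets_list.length ≤ 1 then true
  else
    -- reference_set = sets_list[0]; the branch guarantees the list is nonempty
    let reference_set := sets_list.headD []
    -- sets_list[1:]  (PySem.List.slice_from_one : slice xs (some 1) none = xs.tail)
    pvALoop reference_set sets_list.tail

-- ===== PORT B =====
-- {frozenset(s) for s in sets_list}: accumulate distinct sets (membership up to set equality)
def pvAddDistinct (acc : List (List Int)) (s : List Int) : List (List Int) :=
  if acc.any (fun t => PySem.Set.equal t s) then acc else acc ++ [s]

def check_if_all_sets_are_same_alt (sets_list : List (List Int)) : Bool :=
  decide ((sets_list.foldl pvAddDistinct []).length ≤ 1)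

-- ===== PRECONDITION & SPEC =====
def Spec_check_if_all_sets_are_same (sets_list : List (List Int)) (out : Bool) : Prop := out = check_if_all_sets_are_same_alt sets_list
instance (sets_list : List (List Int)) (out : Bool) : Decidable (Spec_check_if_all_sets_are_same sets_list out) := by unfold Spec_check_if_all_sets_are_same; infer_instance

-- ===== CLAIM (what is proved, stated in full; the proofs are below) =====
def Claim_equal_check_if_all_sets_are_same : Prop := ∀ (sets_list : List (List Int)), Dom_check_if_all_sets_are_same sets_list → Spec_check_if_all_sets_are_same sets_list (check_if_all_sets_are_same sets_list)

-- ===== LEMMAS AND PROOFS =====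

theorem pvSetEqual_symm (s t : List Int) : PySem.Set.equal s t = PySem.Set.equal t s := by
  cases h1 : PySem.Set.equal s t <;> cases h2 : PySem.Set.equal t s
  · rfl
  · exact absurd ((PySem.Set.equal_iff s t).mpr
      (fun x => ((PySem.Set.equal_iff t s).mp h2 x).symm)) (by simp [h1])
  · exact absurd ((PySem.Set.equal_iff t s).mpr
      (fun x => ((PySem.Set.equal_iff s t).mp h1 x).symm)) (by simp [h2])
  · rfl

theorem pvALoop_eq_all (ref : List Int) (l : List (List Int)) :
    pvALoop ref l = l.all (fun s => PySem.Set.equal s ref) := by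
  induction l with
  | nil => rfl
  | cons s rest ih =>
    simp only [pvALoop, List.all_cons]
    cases h : PySem.Set.equal s ref <;> simp [ih]

theorem pvFoldl_length_mono (acc : List (List Int)) (l : List (List Int)) :
    acc.length ≤ (l.foldl pvAddDistinct acc).length := by
  induction l generalizing acc with
  | nil => exact le_rfl
  | cons s rest ih =>
    refine le_trans ?_ (ih (pvAddDistinct acc s))
    unfold pvAddDistinct
    split <;> simp

theorem pvFoldl_singleton (r : List Int) (l : List (List Int)) :
    ((l.foldl pvAddDistinct [r]).length ≤ 1) ↔ (l.all (fun s => PySem.Set.equal s r) = true) := by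
  induction l with
  | nil => simp
  | cons s rest ih =>
    simp only [List.foldl_cons, List.all_cons, Bool.and_eq_true]
    by_cases h : PySem.Set.equal s r = true
    · have : pvAddDistinct [r] s = [r] := by
        unfold pvAddDistinct
        simp [pvSetEqual_symm r s, h]
      rw [this]
      simp [ih, h]
    · have hne : pvAddDistinct [r] s = [r, s] := by
        unfold pvAddDistinct
        simp [pvSetEqual_symm r s, eq_false h]
      rw [hne]
      constructor
      · intro hle
        have := pvFoldl_length_mono [r, s] rest
        simp at this
        omega
      · rintro ⟨h1, _⟩; exact absurd h1 h

theorem check_if_all_sets_are_same_eq (sets_list : List (List Int)) :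
    check_if_all_sets_are_same sets_list = check_if_all_sets_are_same_alt sets_list := by
  cases sets_list with
  | nil => rfl
  | cons r rest =>
    cases rest with
    | nil => rfl
    | cons s rest' =>
      unfold check_if_all_sets_are_same check_if_all_sets_are_same_alt
      simp only [List.length_cons, List.headD_cons, List.tail_cons, List.foldl_cons,
        show pvAddDistinct [] r = [r] by unfold pvAddDistinct; simp]
      rw [if_neg (by omega), pvALoop_eq_all]
      rcases Bool.eq_false_or_eq_true ((s :: rest').all (fun t => PySem.Set.equal t r)) with h | h
      · rw [h, eq_comm, decide_eq_true_iff]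
        have := (pvFoldl_singleton r (s :: rest')).mpr h
        simpa using this
      · rw [h, eq_comm, decide_eq_false_iff_not]
        rw [← Bool.not_eq_true] at h
        exact fun hle => h ((pvFoldl_singleton r (s :: rest')).mp (by simpa using hle))

-- ===== VERDICT (by name: the statement is the Claim_ definition above) =====
theorem check_if_all_sets_are_same_spec : Claim_equal_check_if_all_sets_are_same := by
  intro sets_list _
  unfold Spec_check_if_all_sets_are_same
  exact check_if_all_sets_are_same_eq sets_list
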